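-- pv_equiv track=rewrite | github.com/shreyasdhuliya/Restaurant-Rating-prediction-onZomato | helper.py | phone_num_count
-- ===== SOURCE A (Python) =====
-- def phone_num_count(phone_nums):
--     '''
--     counts the phone number from string and returns count
--     example "+91 231231231\n +91312312312" returns 2
--     the function returns 0 if missing
--     '''
--     phones_n = 0
--     if phone_nums == '0' or phone_nums == 0 or type(phone_nums) == float:
--         return 0
--     length = 0
--     for i in range(len(phone_nums)):
--         try:
--             if int(phone_nums[i]):
--                 length += 1
--                 if length == 8:
--                     phones_n += 1
--         except:
--             length = 0
--     return phones_n
-- ===== SOURCE B (Python) =====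
-- def phone_num_count(phone_nums):
--     # Run-based re-implementation: collect maximal runs of digit characters
--     # (per-character int() check), then count runs with >= 8 non-zero digits.
--     runs = []
--     cur = []
--     for ch in phone_nums:
--         try:
--             int(ch)
--             cur.append(ch)
--         except:
--             if cur:
--                 runs.append(cur)
--             cur = []
--     if cur:
--         runs.append(cur)
--     return sum(1 for run in runs if sum(1 for ch in run if int(ch) != 0) >= 8)
-- ===== Notes on version B (the rewrite author's own statement) =====
-- stated objective: alternative
-- what changed: A keeps one running counter of consecutive non-zero digits and bumps the count the moment it reaches 8; B instead collects the maximal digit runs explicitly and then counts the runs containing at least 8 non-zero digits, dropping A's redundant initial guards (which never change the result for a string input).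
import Mathlib
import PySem

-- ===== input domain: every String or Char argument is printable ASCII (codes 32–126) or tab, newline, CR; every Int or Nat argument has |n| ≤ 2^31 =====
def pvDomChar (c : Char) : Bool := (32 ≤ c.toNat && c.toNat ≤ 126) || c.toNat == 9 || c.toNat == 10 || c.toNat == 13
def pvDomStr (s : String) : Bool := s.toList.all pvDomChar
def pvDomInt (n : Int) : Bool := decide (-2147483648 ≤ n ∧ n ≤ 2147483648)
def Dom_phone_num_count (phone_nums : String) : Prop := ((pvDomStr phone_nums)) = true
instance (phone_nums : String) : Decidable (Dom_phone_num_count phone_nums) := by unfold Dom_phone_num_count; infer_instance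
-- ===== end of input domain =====

-- B replaces A's single running counter with an explicit run-splitting pass
-- (collect maximal digit runs, then count runs with ≥ 8 non-zero digits);
-- same cost, different decomposition. A's non-string type guards cannot fire
-- for a String argument and are not ported; A's remaining initial guard is
-- redundant (B computes the same value there), so B omits it.

-- ===== PORT A =====
-- int(phone_nums[i]) on a 1-char string: PySem.Int.ofStr? (none = exception)
def phone_num_count (phone_nums : String) : Int :=
  if phone_nums = "0" then 0
  else
    (phone_nums.toList.foldl
      (fun (st : Int × Int) c =>
        match PySem.Int.ofStr? (String.ofList [c]) with
        | some v =>
          if v ≠ 0 then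
            let length := st.2 + 1
            if length = 8 then (st.1 + 1, length) else (st.1, length)
          else st
        | none => (st.1, 0))
      (0, 0)).1

-- ===== PORT B =====
-- per-character int() success check, as in Source B
def pvIsDigitInt (c : Char) : Bool := (PySem.Int.ofStr? (String.ofList [c])).isSome

def phone_num_count_alt (phone_nums : String) : Int :=
  let st := phone_nums.toList.foldl
    (fun (st : List (List Char) × List Char) c =>
      if pvIsDigitInt c then (st.1, st.2 ++ [c])
      else (if st.2 ≠ [] then st.1 ++ [st.2] else st.1, ([] : List Char)))
    ([], [])
  let runs := if st.2 ≠ [] then st.1 ++ [st.2] else st.1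
  ((runs.filter (fun run =>
      8 ≤ (run.filter (fun c => PySem.Int.ofStr? (String.ofList [c]) ≠ some 0)).length)).length : Int)

-- ===== PRECONDITION & SPEC =====
def Spec_phone_num_count (phone_nums : String) (out : Int) : Prop := out = phone_num_count_alt phone_nums
instance (phone_nums : String) (out : Int) : Decidable (Spec_phone_num_count phone_nums out) := by unfold Spec_phone_num_count; infer_instance

-- ===== CLAIM (what is proved, stated in full; the proofs are below) =====
def Claim_equal_phone_num_count : Prop := ∀ (phone_nums : String), Dom_phone_num_count phone_nums → Spec_phone_num_count phone_nums (phone_num_count phone_nums)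

-- ===== LEMMAS AND PROOFS =====

-- abbreviations used only by the proofs
def pvNz (run : List Char) : Nat :=
  (run.filter (fun c => PySem.Int.ofStr? (String.ofList [c]) ≠ some 0)).length

def pvScore (acc : List (List Char)) : Nat :=
  (acc.filter (fun run => 8 ≤ pvNz run)).length

def pvInd (cur : List Char) : Int := if 8 ≤ pvNz cur then 1 else 0

def pvStepA (st : Int × Int) (c : Char) : Int × Int :=
  match PySem.Int.ofStr? (String.ofList [c]) with
  | some v =>
    if v ≠ 0 then
      let length := st.2 + 1
      if length = 8 then (st.1 + 1, length) else (st.1, length)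
    else st
  | none => (st.1, 0)

def pvStepB (st : List (List Char) × List Char) (c : Char) : List (List Char) × List Char :=
  if pvIsDigitInt c then (st.1, st.2 ++ [c])
  else (if st.2 ≠ [] then st.1 ++ [st.2] else st.1, ([] : List Char))

def pvFinal (st : List (List Char) × List Char) : Nat :=
  pvScore (if st.2 ≠ [] then st.1 ++ [st.2] else st.1)

theorem pvStepA_none {c : Char} (h : PySem.Int.ofStr? (String.ofList [c]) = none)
    (p l : Int) : pvStepA (p, l) c = (p, 0) := by simp [pvStepA, h]

theorem pvStepA_zero {c : Char} (h : PySem.Int.ofStr? (String.ofList [c]) = some 0)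
    (p l : Int) : pvStepA (p, l) c = (p, l) := by simp [pvStepA, h]

theorem pvStepA_nz {c : Char} {v : Int} (h : PySem.Int.ofStr? (String.ofList [c]) = some v)
    (hv : v ≠ 0) (p l : Int) :
    pvStepA (p, l) c = if l + 1 = 8 then (p + 1, l + 1) else (p, l + 1) := by
  simp [pvStepA, h, hv]

theorem pvStepB_digit {c : Char} (h : (PySem.Int.ofStr? (String.ofList [c])).isSome)
    (acc : List (List Char)) (cur : List Char) :
    pvStepB (acc, cur) c = (acc, cur ++ [c]) := by
  have h' := h; simp at h'; simp [pvStepB, pvIsDigitInt, h']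

theorem pvStepB_nondigit {c : Char} (h : PySem.Int.ofStr? (String.ofList [c]) = none)
    (acc : List (List Char)) (cur : List Char) :
    pvStepB (acc, cur) c = (if cur ≠ [] then acc ++ [cur] else acc, ([] : List Char)) := by
  simp [pvStepB, pvIsDigitInt, h]

theorem pvNz_nil : pvNz ([] : List Char) = 0 := by simp [pvNz]

theorem pvInd_nil : pvInd ([] : List Char) = 0 := by simp [pvInd, pvNz]

theorem pvScore_append_run (acc : List (List Char)) (cur : List Char) :
    (pvScore (acc ++ [cur]) : Int) = pvScore acc + pvInd cur := by
  simp only [pvScore, pvInd, List.filter_append]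
  split_ifs with h <;> simp [h]

theorem pvFinal_eq (acc : List (List Char)) (cur : List Char) :
    (pvFinal (acc, cur) : Int) = pvScore acc + pvInd cur := by
  unfold pvFinal
  by_cases h : cur = []
  · subst h; simp [pvInd, pvNz]
  · simp only [h, ne_eq, not_false_iff, if_true]
    exact pvScore_append_run acc cur

theorem pvNz_append_zero {c : Char} (h : PySem.Int.ofStr? (String.ofList [c]) = some 0)
    (cur : List Char) : pvNz (cur ++ [c]) = pvNz cur := by
  have h' := h; simp at h'; simp [pvNz, List.filter_append, h']

theorem pvNz_append_nz {c : Char} {v : Int} (h : PySem.Int.ofStr? (String.ofList [c]) = some v)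
    (hv : v ≠ 0) (cur : List Char) : pvNz (cur ++ [c]) = pvNz cur + 1 := by
  have h' := h; simp at h'; simp [pvNz, List.filter_append, h', hv]

theorem pv_main (rest : List Char) :
    ∀ (p : Int) (acc : List (List Char)) (cur : List Char),
    (rest.foldl pvStepA (p, (pvNz cur : Int))).1 + pvInd cur + (pvScore acc : Int) - p
      = (pvFinal (rest.foldl pvStepB (acc, cur)) : Int) := by
  induction rest with
  | nil =>
    intro p acc cur
    simp only [List.foldl_nil, pvFinal_eq]; ring
  | cons c rest ih =>
    intro p acc cur
    simp only [List.foldl_cons]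
    cases h : PySem.Int.ofStr? (String.ofList [c]) with
    | none =>
      rw [pvStepA_none h, pvStepB_nondigit h]
      have h0 : (0 : Int) = (pvNz ([] : List Char) : Int) := by simp [pvNz_nil]
      rw [h0, ← ih p (if cur ≠ [] then acc ++ [cur] else acc) []]
      have hs : (pvScore (if cur ≠ [] then acc ++ [cur] else acc) : Int)
          = (pvScore acc : Int) + pvInd cur := by
        by_cases hc : cur = []
        · simp [hc, pvInd, pvNz]
        · simp only [hc, ne_eq, not_false_iff, if_true, pvScore_append_run]
      rw [pvInd_nil, hs]
      ring
    | some v =>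
      by_cases hv : v = 0
      · subst hv
        rw [pvStepA_zero h, pvStepB_digit (by simp [h])]
        have hcur := pvNz_append_zero h cur
        have hcurZ : ((pvNz (cur ++ [c]) : Nat) : Int) = (pvNz cur : Int) := by rw [hcur]
        have hind : pvInd (cur ++ [c]) = pvInd cur := by simp [pvInd, hcur]
        have := ih p acc (cur ++ [c])
        rw [hcurZ, hind] at this
        exact this
      · rw [pvStepA_nz h hv, pvStepB_digit (by simp [h])]
        have hcur := pvNz_append_nz h hv cur
        have hcurZ : ((pvNz (cur ++ [c]) : Nat) : Int) = (pvNz cur : Int) + 1 := by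
          rw [hcur]; push_cast; ring
        by_cases h8 : (pvNz cur : Int) + 1 = 8
        · rw [if_pos h8]
          have := ih (p + 1) acc (cur ++ [c])
          rw [hcurZ] at this
          have i1 : pvInd (cur ++ [c]) = 1 := by
            simp only [pvInd, hcur]; rw [if_pos]; omega
          have i0 : pvInd cur = 0 := by
            simp only [pvInd]; rw [if_neg]; omega
          rw [i1] at this
          rw [i0]
          omega
        · rw [if_neg h8]
          have := ih p acc (cur ++ [c])
          rw [hcurZ] at this
          have hind : pvInd (cur ++ [c]) = pvInd cur := by
            simp only [pvInd, hcur]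
            by_cases hge : 8 ≤ pvNz cur
            · rw [if_pos (by omega), if_pos hge]
            · rw [if_neg (by omega), if_neg hge]
          rw [hind] at this
          exact this

theorem pv_ports_eq (s : String) : phone_num_count s = phone_num_count_alt s := by
  by_cases h0 : s = "0"
  · subst h0; decide
  · have hmain := pv_main s.toList 0 [] []
    rw [pvNz_nil] at hmain
    simp only [pvInd_nil, pvScore, List.filter_nil, List.length_nil] at hmain
    have hmain' : (s.toList.foldl pvStepA (0, 0)).1
        = (pvFinal (s.toList.foldl pvStepB ([], [])) : Int) := by
      push_cast at hmain ⊢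
      omega
    unfold phone_num_count phone_num_count_alt
    rw [if_neg h0]
    exact hmain'

-- ===== VERDICT (by name: the statement is the Claim_ definition above) =====
theorem phone_num_count_spec : Claim_equal_phone_num_count := by
  intro s _
  unfold Spec_phone_num_count
  exact pv_ports_eq s
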